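-- pv_equiv track=rewrite | github.com/janabrah/Advent_of_Code_2024 | day_09/day_09.py | makeStarts
-- ===== SOURCE A (Python) =====
-- def makeStarts(values, blanks):
--     blankResult = []
--     valueResult = []
--     location = 0
--     for i in range(len(values)):
--         valueResult.append(location)
--         location += values[i]
--         blankResult.append(location)
--         if i < len(blanks):
--             location += blanks[i]
--     return (blankResult, valueResult)
-- ===== SOURCE B (Python) =====
-- def makeStarts(values, blanks):
--     # prefix-sum table decomposition: build per-index widths, scan them, then derive blank starts
--     n = len(values)
--     widths = [v + b for v, b in zip(values, blanks)] + values[len(blanks):]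
--     starts = [0]
--     for w in widths[:-1]:
--         starts.append(starts[-1] + w)
--     starts = starts[:n]
--     blankResult = [s + v for s, v in zip(starts, values)]
--     return (blankResult, starts)
-- ===== Notes on version B (the rewrite author's own statement) =====
-- stated objective: alternative
-- what changed: Replaces A's single stateful loop (running location, interleaved appends, per-index blank guard) with a prefix-sum decomposition: a widths table (values plus zipped blanks), a scan producing the value starts, and a separate zip deriving the blank starts.
import Mathlib
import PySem

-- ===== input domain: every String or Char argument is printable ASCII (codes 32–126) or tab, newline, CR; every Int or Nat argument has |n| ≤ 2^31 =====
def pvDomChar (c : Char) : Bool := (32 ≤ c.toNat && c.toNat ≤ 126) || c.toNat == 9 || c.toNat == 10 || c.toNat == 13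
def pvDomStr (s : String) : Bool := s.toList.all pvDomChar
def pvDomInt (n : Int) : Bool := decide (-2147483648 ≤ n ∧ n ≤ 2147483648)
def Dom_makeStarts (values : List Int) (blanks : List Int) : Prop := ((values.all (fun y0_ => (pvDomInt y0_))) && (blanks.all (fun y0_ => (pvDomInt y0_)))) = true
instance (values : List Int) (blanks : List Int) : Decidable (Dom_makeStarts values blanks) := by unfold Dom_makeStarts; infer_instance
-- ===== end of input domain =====

-- B replaces A's single stateful loop with a widths table + prefix-sum scan + a zip pass (alternative decomposition, same cost).


-- ===== PORT A =====
-- A's `for i in range(len(values))` walks values with index i and state (blankResult, valueResult, location);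
-- blanks[i] is read only under the guard i < len(blanks), so getD is exact there.
def makeStartsGo (blanks : List Int) : List Int → Nat → List Int → List Int → Int → List Int × List Int
  | [], _, br, vr, _ => (br, vr)
  | v :: vs, i, br, vr, loc =>
      let vr2 := vr ++ [loc]
      let loc2 := loc + v
      let br2 := br ++ [loc2]
      let loc3 := if i < blanks.length then loc2 + blanks.getD i 0 else loc2
      makeStartsGo blanks vs (i + 1) br2 vr2 loc3

def makeStarts (values : List Int) (blanks : List Int) : List Int × List Int :=
  makeStartsGo blanks values 0 [] [] 0

-- ===== PORT B =====
-- transliteration of Source B: widths table, scan (`starts[-1] + w` = getLastD, starts never empty),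
-- `values[len(blanks):]` is the nonnegative in-range slice = drop, `widths[:-1]` = dropLast, `starts[:n]` = take n.
def makeStarts_alt (values : List Int) (blanks : List Int) : List Int × List Int :=
  let n := values.length
  let widths := (List.zipWith (fun v b => v + b) values blanks) ++ values.drop blanks.length
  let starts0 := widths.dropLast.foldl (fun st w => st ++ [st.getLastD 0 + w]) [0]
  let starts := starts0.take n
  let blankResult := List.zipWith (fun s v => s + v) starts values
  (blankResult, starts)

-- ===== PRECONDITION & SPEC =====
def Spec_makeStarts (values : List Int) (blanks : List Int) (out : List Int × List Int) : Prop := out = makeStarts_alt values blanks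
instance (values : List Int) (blanks : List Int) (out : List Int × List Int) : Decidable (Spec_makeStarts values blanks out) := by unfold Spec_makeStarts; infer_instance

-- ===== CLAIM (what is proved, stated in full; the proofs are below) =====
def Claim_equal_makeStarts : Prop := ∀ (values : List Int) (blanks : List Int), Dom_makeStarts values blanks → Spec_makeStarts values blanks (makeStarts values blanks)

-- ===== LEMMAS AND PROOFS =====

-- common characterization: walk values, consuming one blank per value
def specS : List Int → List Int → Int → List Int × List Int
  | [], _, _ => ([], [])
  | v :: vs, bs, loc =>
      let r := specS vs bs.tail (loc + v + bs.headD 0)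
      ((loc + v) :: r.1, loc :: r.2)

def widthsL (values blanks : List Int) : List Int :=
  (List.zipWith (fun v b => v + b) values blanks) ++ values.drop blanks.length

def scanFrom (a : Int) : List Int → List Int
  | [] => []
  | w :: ws => (a + w) :: scanFrom (a + w) ws

lemma widthsL_cons (v : Int) (vs bs : List Int) :
    widthsL (v :: vs) bs = (v + bs.headD 0) :: widthsL vs bs.tail := by
  cases bs <;> simp [widthsL]

lemma widthsL_length (vs bs : List Int) : (widthsL vs bs).length = vs.length := by
  induction vs generalizing bs with
  | nil => cases bs <;> simp [widthsL]
  | cons v vs ih => rw [widthsL_cons]; simp [ih]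

lemma goA_eq (blanks : List Int) : ∀ (vs : List Int) (i : Nat) (br vr : List Int) (loc : Int),
    makeStartsGo blanks vs i br vr loc =
      (br ++ (specS vs (blanks.drop i) loc).1, vr ++ (specS vs (blanks.drop i) loc).2) := by
  intro vs
  induction vs with
  | nil => intro i br vr loc; simp [makeStartsGo, specS]
  | cons v vs ih =>
    intro i br vr loc
    have hhead : blanks.getD i 0 = (blanks.drop i).headD 0 := by
      simp [List.getD_eq_getElem?_getD, List.headD_eq_head?_getD, List.head?_drop]
    have hloc : (if i < blanks.length then loc + v + blanks.getD i 0 else loc + v)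
        = loc + v + (blanks.drop i).headD 0 := by
      by_cases h : i < blanks.length
      · rw [if_pos h, hhead]
      · have : blanks.drop i = [] := by
          apply List.drop_eq_nil_of_le; omega
        simp [h, this]
    have htail : (blanks.drop i).tail = blanks.drop (i + 1) := by
      rw [List.tail_drop]
    simp only [makeStartsGo, ih (i + 1), hloc, specS, htail]
    simp

lemma specS_fst (vs : List Int) : ∀ (bs : List Int) (loc : Int),
    (specS vs bs loc).1 = List.zipWith (fun s v => s + v) (specS vs bs loc).2 vs := by
  induction vs with
  | nil => intro bs loc; simp [specS]
  | cons v vs ih => intro bs loc; simp [specS, ih]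

lemma foldl_scan (ws : List Int) : ∀ (st : List Int), st ≠ [] →
    ws.foldl (fun st w => st ++ [st.getLastD 0 + w]) st = st ++ scanFrom (st.getLastD 0) ws := by
  induction ws with
  | nil => intro st _; simp [scanFrom]
  | cons w ws ih =>
    intro st hne
    have h1 : (st ++ [st.getLastD 0 + w]) ≠ [] := by simp
    have h2 : (st ++ [st.getLastD 0 + w]).getLastD 0 = st.getLastD 0 + w := by
      simp [List.getLastD_eq_getLast?]
    simp only [List.foldl_cons, ih _ h1, h2, scanFrom, List.append_assoc, List.singleton_append]

lemma specS_snd (vs : List Int) : ∀ (bs : List Int) (loc : Int),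
    (specS vs bs loc).2 = (loc :: scanFrom loc (widthsL vs bs).dropLast).take vs.length := by
  induction vs with
  | nil => intro bs loc; simp [specS]
  | cons v vs ih =>
    intro bs loc
    rw [widthsL_cons]
    cases hvs : vs with
    | nil =>
      have : widthsL [] bs.tail = [] := by cases bs.tail <;> simp [widthsL]
      subst hvs
      simp [specS, this, scanFrom]
    | cons v' vs' =>
      subst hvs
      have hne : widthsL (v' :: vs') bs.tail ≠ [] := by
        intro h
        have hl := widthsL_length (v' :: vs') bs.tail
        rw [h] at hl; simp at hl
      rw [List.dropLast_cons_of_ne_nil hne]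
      have hstep : (specS (v :: v' :: vs') bs loc).2
          = loc :: (specS (v' :: vs') bs.tail (loc + v + bs.headD 0)).2 := rfl
      have harith : loc + v + bs.headD 0 = loc + (v + bs.headD 0) := by ring
      rw [hstep, harith, ih bs.tail (loc + (v + bs.headD 0))]
      simp [scanFrom, List.take_succ_cons]

lemma makeStarts_alt_eq_specS (values blanks : List Int) :
    makeStarts_alt values blanks = specS values blanks 0 := by
  have h2 := specS_snd values blanks 0
  have h1 := specS_fst values blanks 0
  have hscan : (widthsL values blanks).dropLast.foldl (fun st w => st ++ [st.getLastD 0 + w]) [0]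
      = 0 :: scanFrom 0 (widthsL values blanks).dropLast := by
    simpa using foldl_scan (widthsL values blanks).dropLast [0] (by simp)
  simp only [makeStarts_alt]
  rw [show (List.zipWith (fun v b => v + b) values blanks ++ values.drop blanks.length)
        = widthsL values blanks from rfl, hscan, ← h2, ← h1]

-- ===== VERDICT (by name: the statement is the Claim_ definition above) =====
theorem makeStarts_spec : Claim_equal_makeStarts := by
  intro values blanks _
  show makeStarts values blanks = makeStarts_alt values blanks
  rw [makeStarts_alt_eq_specS, makeStarts, goA_eq]
  simp
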